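-- pv_equiv track=rewrite | github.com/opimentel-github/astro-lightcurves-classifier | lcclassifier/results/plots.py | get_new_order_classes
-- ===== SOURCE A (Python) =====
-- def get_new_order_classes(class_names):
-- 	new_classes = []
-- 	for nc in ['SNIa', 'SNIbc', 'SNII', 'SLSN']:
-- 		for c in class_names:
-- 			if nc in c:
-- 				new_classes.append(c)
-- 				break
-- 	return new_classes
-- ===== SOURCE B (Python) =====
-- def get_new_order_classes(class_names):
-- 	first = {}
-- 	for c in class_names:
-- 		for nc in ['SNIa', 'SNIbc', 'SNII', 'SLSN']:
-- 			if nc in c and nc not in first: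
-- 				first[nc] = c
-- 	return [first[nc] for nc in ['SNIa', 'SNIbc', 'SNII', 'SLSN'] if nc in first]
-- ===== Notes on version B (the rewrite author's own statement) =====
-- stated objective: alternative
-- what changed: Transposed loop nesting: one pass over class_names records the first class per prefix in a dict (set-if-absent), then the result is emitted by scanning the fixed prefix list; A instead rescans class_names from the start for each prefix.
import Mathlib
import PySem

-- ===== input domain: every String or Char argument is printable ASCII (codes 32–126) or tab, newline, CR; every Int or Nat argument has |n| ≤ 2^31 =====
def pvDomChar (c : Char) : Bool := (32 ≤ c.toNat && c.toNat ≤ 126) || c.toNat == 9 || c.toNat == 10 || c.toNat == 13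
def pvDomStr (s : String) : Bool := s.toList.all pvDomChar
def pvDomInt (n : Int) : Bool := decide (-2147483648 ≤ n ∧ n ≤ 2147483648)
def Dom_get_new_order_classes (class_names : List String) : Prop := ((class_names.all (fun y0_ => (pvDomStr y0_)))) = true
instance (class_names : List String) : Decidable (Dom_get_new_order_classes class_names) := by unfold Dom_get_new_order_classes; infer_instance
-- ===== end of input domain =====

-- B replaces A's per-prefix rescans of class_names by one pass over class_names that
-- records the first matching class per prefix in a dict, then emits in prefix order.

-- ===== PORT A =====
-- A's inner 'for c in class_names: if nc in c: append; break' = first matching class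
def pvFirstMatch (nc : String) : List String → Option String
  | [] => none
  | c :: rest => if PySem.Str.isIn nc c then some c else pvFirstMatch nc rest

def get_new_order_classes (class_names : List String) : List String :=
  ["SNIa", "SNIbc", "SNII", "SLSN"].foldl
    (fun new_classes nc =>
      match pvFirstMatch nc class_names with
      | some c => new_classes ++ [c]
      | none => new_classes) []

-- ===== PORT B =====
def get_new_order_classes_alt (class_names : List String) : List String :=
  let first : PySem.Dict String String :=
    class_names.foldl
      (fun d c =>
        ["SNIa", "SNIbc", "SNII", "SLSN"].foldl
          (fun d nc =>
            if PySem.Str.isIn nc c && !(d.contains nc) then d.insert nc c else d) d)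
      PySem.Dict.empty
  ["SNIa", "SNIbc", "SNII", "SLSN"].foldl
    (fun out nc =>
      match first.get? nc with
      | some c => out ++ [c]
      | none => out) []

-- ===== PRECONDITION & SPEC =====
def Spec_get_new_order_classes (class_names : List String) (out : List String) : Prop := out = get_new_order_classes_alt class_names
instance (class_names : List String) (out : List String) : Decidable (Spec_get_new_order_classes class_names out) := by unfold Spec_get_new_order_classes; infer_instance

-- ===== CLAIM (what is proved, stated in full; the proofs are below) =====
def Claim_equal_get_new_order_classes : Prop := ∀ (class_names : List String), Dom_get_new_order_classes class_names → Spec_get_new_order_classes class_names (get_new_order_classes class_names)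

-- ===== LEMMAS AND PROOFS =====

-- one inner pass over a prefix list ps for a single class c, read at key k
theorem pv_inner_get? (ps : List String) (d : PySem.Dict String String) (c k : String) :
    (ps.foldl (fun d nc =>
        if PySem.Str.isIn nc c && !(d.contains nc) then d.insert nc c else d) d).get? k
      = if k ∈ ps ∧ d.get? k = none ∧ PySem.Str.isIn k c = true then some c else d.get? k := by
  induction ps generalizing d with
  | nil => simp
  | cons nc ps ih =>
    rw [List.foldl_cons, ih]
    have key : (if PySem.Str.isIn nc c && !(d.contains nc) then d.insert nc c else d).get? k
        = if k = nc ∧ d.get? k = none ∧ PySem.Str.isIn k c = true then some c else d.get? k := by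
      by_cases h1 : (PySem.Str.isIn nc c && !(d.contains nc)) = true
      · rw [if_pos h1]
        have h1' : PySem.Str.isIn nc c = true ∧ (!d.contains nc) = true := by
          simpa using h1
        have hnone : d.get? nc = none := by
          have := h1'.2
          rw [Bool.not_eq_true', PySem.Dict.contains_eq_isSome_get?] at this
          exact Option.not_isSome_iff_eq_none.1 (by simp [this])
        by_cases hk : k = nc
        · subst hk
          rw [PySem.Dict.get?_insert_self, if_pos ⟨rfl, hnone, h1'.1⟩]
        · rw [PySem.Dict.get?_insert_of_ne _ _ hk, if_neg (fun h => hk h.1)]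
      · rw [if_neg h1]
        by_cases hk : k = nc
        · subst hk
          rw [if_neg]
          rintro ⟨-, hnone, hin⟩
          apply h1
          have hin' : PySem.Chars.isIn k.toList c.toList = true := by simpa using hin
          simp [hin', PySem.Dict.contains_eq_isSome_get?, hnone]
        · rw [if_neg (fun h => hk h.1)]
    rw [key]
    by_cases hP : k = nc ∧ d.get? k = none ∧ PySem.Str.isIn k c = true
    · have hm : k ∈ nc :: ps := hP.1 ▸ List.mem_cons_self
      rw [if_pos hP]
      have hin' : PySem.Chars.isIn k.toList c.toList = true := by simpa using hP.2.2
      simp [hm, hP.2.1, hin']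
    · rw [if_neg hP]
      by_cases hr : k ∈ ps ∧ d.get? k = none ∧ PySem.Str.isIn k c = true
      · rw [if_pos hr, if_pos ⟨List.mem_cons_of_mem _ hr.1, hr.2⟩]
      · rw [if_neg hr, if_neg]
        rintro ⟨hm, h2⟩
        rcases List.mem_cons.1 hm with h | h
        · exact hP ⟨h, h2⟩
        · exact hr ⟨h, h2⟩

-- the whole first pass, read at a key of the prefix list, is A's first-match scan
theorem pv_dict_get? (cs : List String) (d : PySem.Dict String String) (k : String)
    (hk : k ∈ ["SNIa", "SNIbc", "SNII", "SLSN"]) :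
    (cs.foldl (fun d c =>
        (["SNIa", "SNIbc", "SNII", "SLSN"] : List String).foldl
          (fun d nc =>
            if PySem.Str.isIn nc c && !(d.contains nc) then d.insert nc c else d) d) d).get? k
      = match d.get? k with
        | some v => some v
        | none => pvFirstMatch k cs := by
  induction cs generalizing d with
  | nil => cases h : d.get? k <;> simp [h, pvFirstMatch]
  | cons c cs ih =>
    rw [List.foldl_cons, ih, pv_inner_get?]
    by_cases hin : PySem.Str.isIn k c = true
    · cases h : d.get? k with
      | none =>
        rw [if_pos ⟨hk, rfl, hin⟩]
        have hin' : PySem.Chars.isIn k.toList c.toList = true := by simpa using hin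
        simp [pvFirstMatch, hin']
      | some v =>
        rw [if_neg (fun hc => absurd hc.2.1 (by simp))]
    · rw [if_neg (fun hc => hin hc.2.2)]
      cases h : d.get? k with
      | none =>
        have hin' : PySem.Chars.isIn k.toList c.toList = false := by
          simpa using hin
        simp [pvFirstMatch, hin']
      | some v => rfl

theorem get_new_order_classes_spec : Claim_equal_get_new_order_classes := by
  intro cs _
  unfold Spec_get_new_order_classes get_new_order_classes get_new_order_classes_alt
  have h1 := pv_dict_get? cs PySem.Dict.empty "SNIa" (by simp)
  have h2 := pv_dict_get? cs PySem.Dict.empty "SNIbc" (by simp)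
  have h3 := pv_dict_get? cs PySem.Dict.empty "SNII" (by simp)
  have h4 := pv_dict_get? cs PySem.Dict.empty "SLSN" (by simp)
  simp only [PySem.Dict.get?_empty] at h1 h2 h3 h4
  simp only [List.foldl_cons, List.foldl_nil] at h1 h2 h3 h4 ⊢
  rw [h1, h2, h3, h4]
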